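-- pv_equiv track=rewrite | github.com/juanfaldana20/scraping_intelligence | src/scrapers/rappi.py | _find_store
-- ===== SOURCE A (Python) =====
-- PRIORITY_KEYWORDS = [
--     "oxxo", "7-eleven", "7 eleven", "walmart", "chedraui",
--     "soriana", "superama", "la comer", "bodega aurrera",
-- ]
--
-- FAST_FOOD_KEYWORDS = [
--     "burger king", "carl", "subway", "domino", "pizza hut",
--     "little caesars", "papa john", "kfc", "popeyes",
--     "mcdonald", "mc don", "wendys", "wendy",
--     "church", "tim horton",
-- ]
--
-- FALLBACK_KEYWORDS = ["supermercado", "abarrotes", "minisuper", "mini super"]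
--
-- def _find_store(stores):
--     """
--     Busca la mejor tienda disponible en el feed de Rappi.
--
--     Recorre la lista de tiendas aplicando una jerarquía de prioridad:
--     1. Tiendas de conveniencia/supermercados (OXXO, Walmart, etc.)
--     2. Cadenas de fast-food (Burger King, Subway, etc.)
--     3. Términos genéricos (supermercado, abarrotes)
--     4. Primer restaurante disponible (fallback final)
--
--     Args:
--         stores: Lista de diccionarios con los datos de cada tienda del feed.
--
--     Returns:
--         Tupla (tienda, tipo_match) donde tipo_match indica cómo se encontró.
--         Retorna (None, None) si la lista está vacía.
--     """
--     # Nivel 1: Buscar tiendas de conveniencia/supermercados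
--     for keyword in PRIORITY_KEYWORDS:
--         for store in stores:
--             name  = store.get("name", "").lower()
--             brand = store.get("brand_name", "").lower()
--             if keyword in name or keyword in brand:
--                 return store, "tienda_conveniencia"
--
--     # Nivel 2: Buscar cadenas de comida rápida
--     for keyword in FAST_FOOD_KEYWORDS:
--         for store in stores:
--             name  = store.get("name", "").lower()
--             brand = store.get("brand_name", "").lower()
--             if keyword in name or keyword in brand:
--                 return store, "fast_food"
--
--     # Nivel 3: Buscar términos genéricos
--     for keyword in FALLBACK_KEYWORDS:
--         for store in stores:
--             name  = store.get("name", "").lower()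
--             brand = store.get("brand_name", "").lower()
--             if keyword in name or keyword in brand:
--                 return store, "generico"
--
--     # Nivel 4: Tomar el primer restaurante disponible
--     # (todos los restaurantes en MX venden refrescos embotellados)
--     if stores:
--         return stores[0], "primer_disponible"
--
--     return None, None
-- ===== SOURCE B (Python) =====
-- PRIORITY_KEYWORDS = [
--     "oxxo", "7-eleven", "7 eleven", "walmart", "chedraui",
--     "soriana", "superama", "la comer", "bodega aurrera",
-- ]
--
-- FAST_FOOD_KEYWORDS = [
--     "burger king", "carl", "subway", "domino", "pizza hut",
--     "little caesars", "papa john", "kfc", "popeyes",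
--     "mcdonald", "mc don", "wendys", "wendy",
--     "church", "tim horton",
-- ]
--
-- FALLBACK_KEYWORDS = ["supermercado", "abarrotes", "minisuper", "mini super"]
--
-- # One ordered table: global rank -> (keyword, tier label).
-- _KEYWORD_TABLE = (
--     [(kw, "tienda_conveniencia") for kw in PRIORITY_KEYWORDS]
--     + [(kw, "fast_food") for kw in FAST_FOOD_KEYWORDS]
--     + [(kw, "generico") for kw in FALLBACK_KEYWORDS]
-- )
--
-- def _find_store(stores):
--     """Single pass over stores: keep the store whose best-matching keyword
--     has the smallest global rank (earliest store wins ties)."""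
--     best = None  # (rank, store, tag)
--     for store in stores:
--         name = store.get("name", "").lower()
--         brand = store.get("brand_name", "").lower()
--         for rank, (kw, tag) in enumerate(_KEYWORD_TABLE):
--             if kw in name or kw in brand:
--                 if best is None or rank < best[0]:
--                     best = (rank, store, tag)
--                 break
--     if best is not None:
--         return best[1], best[2]
--     if stores:
--         return stores[0], "primer_disponible"
--     return None, None
-- ===== Notes on version B (the rewrite author's own statement) =====
-- stated objective: alternative
-- what changed: Replaced the keyword-major triple of nested loops with early return by a single store-major pass over one pre-built rank-ordered keyword table, tracking the minimum (rank, store) seen and lowercasing each store once.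
import Mathlib
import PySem

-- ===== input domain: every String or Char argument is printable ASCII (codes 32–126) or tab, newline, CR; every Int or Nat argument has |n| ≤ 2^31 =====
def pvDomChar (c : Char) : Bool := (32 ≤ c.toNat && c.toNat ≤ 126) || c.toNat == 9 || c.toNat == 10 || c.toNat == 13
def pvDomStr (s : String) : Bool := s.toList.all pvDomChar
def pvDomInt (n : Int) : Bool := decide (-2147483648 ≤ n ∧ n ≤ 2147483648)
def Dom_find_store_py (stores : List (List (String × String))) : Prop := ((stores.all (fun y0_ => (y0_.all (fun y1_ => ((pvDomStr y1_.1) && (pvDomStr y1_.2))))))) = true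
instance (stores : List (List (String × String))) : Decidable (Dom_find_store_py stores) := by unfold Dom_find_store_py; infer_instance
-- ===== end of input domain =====

-- B replaces A's keyword-major nested loops (early return) by one store-major pass over a
-- rank-ordered keyword table tracking the minimum-rank match; alternative decomposition, same results.


-- shared primitive of both Pythons: store.get(k, "").lower() and the containment test
def pvName (s : List (String × String)) : String :=
  PySem.Str.lower ((PySem.Dict.mk s).getD "name" "")

def pvBrand (s : List (String × String)) : String :=
  PySem.Str.lower ((PySem.Dict.mk s).getD "brand_name" "")

def pvMatch (kw : String) (s : List (String × String)) : Bool :=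
  PySem.Str.isIn kw (pvName s) || PySem.Str.isIn kw (pvBrand s)

def PRIORITY_KEYWORDS : List String :=
  ["oxxo", "7-eleven", "7 eleven", "walmart", "chedraui",
   "soriana", "superama", "la comer", "bodega aurrera"]

def FAST_FOOD_KEYWORDS : List String :=
  ["burger king", "carl", "subway", "domino", "pizza hut",
   "little caesars", "papa john", "kfc", "popeyes",
   "mcdonald", "mc don", "wendys", "wendy",
   "church", "tim horton"]

def FALLBACK_KEYWORDS : List String := ["supermercado", "abarrotes", "minisuper", "mini super"]

-- ===== PORT A =====
-- inner loop: 'for store in stores: … if keyword in name or keyword in brand: return store'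
def aInner (kw : String) : List (List (String × String)) → Option (List (String × String))
  | [] => none
  | s :: rest => if pvMatch kw s then some s else aInner kw rest

-- outer loop of one level: 'for keyword in KEYWORDS: …'
def aLevel (kws : List String) (stores : List (List (String × String))) :
    Option (List (String × String)) :=
  match kws with
  | [] => none
  | kw :: rest =>
    match aInner kw stores with
    | some s => some s
    | none => aLevel rest stores

def find_store_py (stores : List (List (String × String))) :
    (Option (List (String × String))) × Option String :=
  match aLevel PRIORITY_KEYWORDS stores with
  | some s => (some s, some "tienda_conveniencia")
  | none =>
    match aLevel FAST_FOOD_KEYWORDS stores with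
    | some s => (some s, some "fast_food")
    | none =>
      match aLevel FALLBACK_KEYWORDS stores with
      | some s => (some s, some "generico")
      | none =>
        match stores with
        | [] => (none, none)
        | s :: _ => (some s, some "primer_disponible")

-- ===== PORT B =====
def pvTable : List (String × String) :=
  PRIORITY_KEYWORDS.map (fun k => (k, "tienda_conveniencia"))
    ++ FAST_FOOD_KEYWORDS.map (fun k => (k, "fast_food"))
    ++ FALLBACK_KEYWORDS.map (fun k => (k, "generico"))

-- 'for rank, (kw, tag) in enumerate(_KEYWORD_TABLE): if match: … break'
def bRank (s : List (String × String)) : List (String × String) → Nat → Option (Nat × String)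
  | [], _ => none
  | (kw, tag) :: rest, r => if pvMatch kw s then some (r, tag) else bRank s rest (r + 1)

-- 'for store in stores: …' tracking best = (rank, store, tag)
def bLoop : List (List (String × String)) →
    Option (Nat × List (String × String) × String) →
    Option (Nat × List (String × String) × String)
  | [], best => best
  | s :: rest, best =>
    match bRank s pvTable 0 with
    | none => bLoop rest best
    | some (r, tag) =>
      match best with
      | none => bLoop rest (some (r, s, tag))
      | some (rb, sb, tb) =>
        if r < rb then bLoop rest (some (r, s, tag)) else bLoop rest (some (rb, sb, tb))

def find_store_py_alt (stores : List (List (String × String))) :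
    (Option (List (String × String))) × Option String :=
  match bLoop stores none with
  | some (_, s, tag) => (some s, some tag)
  | none =>
    match stores with
    | [] => (none, none)
    | s :: _ => (some s, some "primer_disponible")

-- ===== PRECONDITION & SPEC =====
def Spec_find_store_py (stores : List (List (String × String))) (out : (Option (List (String × String))) × Option String) : Prop := out = find_store_py_alt stores
instance (stores : List (List (String × String))) (out : (Option (List (String × String))) × Option String) : Decidable (Spec_find_store_py stores out) := by unfold Spec_find_store_py; infer_instance

-- ===== CLAIM (what is proved, stated in full; the proofs are below) =====
def Claim_equal_find_store_py : Prop := ∀ (stores : List (List (String × String))), Dom_find_store_py stores → Spec_find_store_py stores (find_store_py stores)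

-- ===== LEMMAS AND PROOFS =====

-- proof-side generalisation of A's keyword-major search to a tagged table
def gLevel : List (String × String) → List (List (String × String)) →
    Option (List (String × String) × String)
  | [], _ => none
  | (kw, tag) :: rest, stores =>
    match aInner kw stores with
    | some s => some (s, tag)
    | none => gLevel rest stores

-- proof-side generalisation of B's pass over an arbitrary table
def gBest (K : List (String × String)) :
    List (List (String × String)) →
    Option (Nat × List (String × String) × String) →
    Option (Nat × List (String × String) × String)
  | [], best => best
  | s :: rest, best =>
    match bRank s K 0 with
    | none => gBest K rest best
    | some (r, tag) =>
      match best with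
      | none => gBest K rest (some (r, s, tag))
      | some (rb, sb, tb) =>
        if r < rb then gBest K rest (some (r, s, tag)) else gBest K rest (some (rb, sb, tb))

theorem bLoop_eq_gBest (stores : List (List (String × String)))
    (best : Option (Nat × List (String × String) × String)) :
    bLoop stores best = gBest pvTable stores best := by
  induction stores generalizing best with
  | nil => rfl
  | cons s rest ih => simp only [bLoop, gBest]; cases bRank s pvTable 0 with
    | none => exact ih best
    | some p =>
      obtain ⟨r, tag⟩ := p
      cases best with
      | none => exact ih _
      | some b => obtain ⟨rb, sb, tb⟩ := b; by_cases h : r < rb <;> simp [h, ih]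

theorem gLevel_map_tag (kws : List String) (tag : String)
    (stores : List (List (String × String))) :
    gLevel (kws.map (fun k => (k, tag))) stores
      = (aLevel kws stores).map (fun s => (s, tag)) := by
  induction kws with
  | nil => rfl
  | cons kw rest ih =>
    simp only [List.map, gLevel, aLevel]
    cases aInner kw stores <;> simp [ih]

theorem gLevel_append (K1 K2 : List (String × String))
    (stores : List (List (String × String))) :
    gLevel (K1 ++ K2) stores
      = match gLevel K1 stores with
        | some p => some p
        | none => gLevel K2 stores := by
  induction K1 with
  | nil => rfl
  | cons p rest ih =>
    obtain ⟨kw, tag⟩ := p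
    simp only [List.cons_append, gLevel]
    cases aInner kw stores <;> simp [ih]

theorem bRank_shift (s : List (String × String)) (K : List (String × String)) (i : Nat) :
    bRank s K (i + 1) = (bRank s K i).map (fun p => (p.1 + 1, p.2)) := by
  induction K generalizing i with
  | nil => rfl
  | cons p rest ih =>
    obtain ⟨kw, tag⟩ := p
    simp only [bRank]
    by_cases h : pvMatch kw s <;> simp [h, ih]

-- once the best has rank 0 it never changes
theorem gBest_zero_stable (K : List (String × String))
    (stores : List (List (String × String))) (s : List (String × String)) (t : String) :
    gBest K stores (some (0, s, t)) = some (0, s, t) := by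
  induction stores with
  | nil => rfl
  | cons s' rest ih =>
    simp only [gBest]
    cases bRank s' K 0 with
    | none => exact ih
    | some p => obtain ⟨r, tag⟩ := p; simp [ih]

-- when some store matches the head keyword, the pass returns rank 0 with the first such store
theorem gBest_head_match (kw tag : String) (K : List (String × String))
    (stores : List (List (String × String))) (s₀ : List (String × String))
    (best : Option (Nat × List (String × String) × String))
    (hb : best = none ∨ ∃ p, best = some p ∧ 0 < p.1)
    (h : aInner kw stores = some s₀) :
    gBest ((kw, tag) :: K) stores best = some (0, s₀, tag) := by
  induction stores generalizing best with
  | nil => simp [aInner] at h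
  | cons s rest ih =>
    simp only [aInner] at h
    by_cases hm : pvMatch kw s
    · simp only [hm, if_pos] at h
      injection h with h; subst h
      simp only [gBest, bRank, hm, if_pos]
      rcases hb with rfl | ⟨⟨rb, sb, tb⟩, rfl, hp⟩
      · exact gBest_zero_stable _ _ _ _
      · simp only at hp
        simp [hp, gBest_zero_stable]
    · simp only [hm, if_neg, Bool.false_eq_true, not_false_iff] at h
      simp only [gBest, bRank, hm, if_neg, Bool.false_eq_true, not_false_iff]
      rw [show (0 + 1 : Nat) = 0 + 1 from rfl, bRank_shift]
      cases hr : bRank s K 0 with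
      | none => simp only [Option.map_none]; exact ih best hb h
      | some p =>
        obtain ⟨r, t'⟩ := p
        simp only [Option.map_some]
        rcases hb with rfl | ⟨⟨rb, sb, tb⟩, rfl, hp⟩
        · exact ih _ (Or.inr ⟨_, rfl, Nat.succ_pos r⟩) h
        · simp only at hp ⊢
          by_cases hlt : r + 1 < rb
          · simp only [hlt, if_pos]
            exact ih _ (Or.inr ⟨_, rfl, Nat.succ_pos r⟩) h
          · simp only [hlt, if_neg, not_false_iff]
            exact ih _ (Or.inr ⟨_, rfl, hp⟩) h

-- when no store matches the head keyword, every rank shifts by one and the winner is unchanged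
theorem gBest_head_miss (kw tag : String) (K : List (String × String))
    (stores : List (List (String × String)))
    (best : Option (Nat × List (String × String) × String))
    (h : aInner kw stores = none) :
    gBest ((kw, tag) :: K) stores (best.map (fun p => (p.1 + 1, p.2)))
      = (gBest K stores best).map (fun p => (p.1 + 1, p.2)) := by
  induction stores generalizing best with
  | nil => rfl
  | cons s rest ih =>
    simp only [aInner] at h
    by_cases hm : pvMatch kw s
    · simp [hm] at h
    · simp only [hm, if_neg, Bool.false_eq_true, not_false_iff] at h
      simp only [gBest, bRank, hm, if_neg, Bool.false_eq_true, not_false_iff]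
      rw [show (0 + 1 : Nat) = 0 + 1 from rfl, bRank_shift]
      cases hr : bRank s K 0 with
      | none => simp only [Option.map_none]; exact ih best h
      | some p =>
        obtain ⟨r, t'⟩ := p
        simp only [Option.map_some]
        cases best with
        | none => exact ih (some (r, s, t')) h
        | some b =>
          obtain ⟨rb, sb, tb⟩ := b
          simp only [Option.map_some]
          by_cases hlt : r < rb
          · simp only [Nat.add_lt_add_right hlt 1 |> if_pos, hlt, if_pos]
            exact ih (some (r, s, t')) h
          · have : ¬ (r + 1 < rb + 1) := fun hc => hlt (Nat.lt_of_add_lt_add_right hc)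
            simp only [this, hlt, if_neg, not_false_iff]
            exact ih (some (rb, sb, tb)) h

-- MAIN: A's keyword-major search over a table = projection of B's store-major pass
theorem gLevel_eq_gBest (K : List (String × String))
    (stores : List (List (String × String))) :
    gLevel K stores = (gBest K stores none).map (fun p => (p.2.1, p.2.2)) := by
  induction K generalizing stores with
  | nil =>
    have hnil : gBest [] stores none = none := by
      induction stores with
      | nil => rfl
      | cons s rest ih => simpa [gBest, bRank] using ih
    simp [gLevel, hnil]
  | cons p K' ih =>
    obtain ⟨kw, tag⟩ := p
    cases h : aInner kw stores with
    | some s₀ =>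
      rw [show gLevel ((kw, tag) :: K') stores = some (s₀, tag) by simp [gLevel, h]]
      rw [gBest_head_match kw tag K' stores s₀ none (Or.inl rfl) h]
      rfl
    | none =>
      rw [show gLevel ((kw, tag) :: K') stores = gLevel K' stores by simp [gLevel, h]]
      have := gBest_head_miss kw tag K' stores none h
      simp only [Option.map_none] at this
      rw [this, ih]
      cases gBest K' stores none with
      | none => rfl
      | some q => rfl

-- A's three-level chain is exactly gLevel over the combined table
theorem find_store_py_eq_gLevel (stores : List (List (String × String))) :
    find_store_py stores
      = match gLevel pvTable stores with
        | some (s, t) => (some s, some t)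
        | none =>
          match stores with
          | [] => (none, none)
          | s :: _ => (some s, some "primer_disponible") := by
  unfold find_store_py pvTable
  rw [gLevel_append, gLevel_append, gLevel_map_tag, gLevel_map_tag, gLevel_map_tag]
  cases aLevel PRIORITY_KEYWORDS stores with
  | some s => rfl
  | none =>
    cases aLevel FAST_FOOD_KEYWORDS stores with
    | some s => rfl
    | none => cases aLevel FALLBACK_KEYWORDS stores <;> rfl

-- ===== VERDICT (by name: the statement is the Claim_ definition above) =====
theorem find_store_py_spec : Claim_equal_find_store_py := by
  intro stores _
  unfold Spec_find_store_py
  rw [find_store_py_eq_gLevel]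
  unfold find_store_py_alt
  rw [bLoop_eq_gBest, gLevel_eq_gBest]
  cases gBest pvTable stores none with
  | none => rfl
  | some p => rfl
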